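-- pv_equiv track=rewrite | github.com/simonjisu/FSQA | src/nlu_utils.py | get_token_mappings
-- ===== SOURCE A (Python) =====
-- from collections import defaultdict
--
-- def get_token_mappings(longer_tokens, shorter_tokens):
--     """
--     longer_tokens: spanned tokens
--     shorter_tokens: origin tokens
--     """
--     i, j = 0, 0
--     token_mappings = defaultdict(list) #{shorter_token: [longer_token]}
--     spanned = ''
--     while i < len(shorter_tokens) and j < len(longer_tokens):
--         s_tkn = shorter_tokens[i]
--         l_tkn = longer_tokens[j]
--         if s_tkn == l_tkn:
--             token_mappings[i].append(j)
--             i += 1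
--             j += 1
--             spanned = ''
--         else:
--             token_mappings[i].append(j)
--             j += 1
--             spanned += l_tkn[2:] if l_tkn.startswith('##') else l_tkn
--             # see whether spanned is equal to current tokens
--             if len(spanned) == len(s_tkn):
--                 i += 1
--                 spanned = ''
--     return token_mappings
-- ===== SOURCE B (Python) =====
-- from collections import defaultdict
--
-- def get_token_mappings(longer_tokens, shorter_tokens):
--     """
--     longer_tokens: spanned tokens
--     shorter_tokens: origin tokens
--     """
--     # stage 1: one scan over longer_tokens recording only the CUT positions
--     # (the index just past each completed origin-token span)
--     cuts = []
--     it = iter(shorter_tokens)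
--     s = next(it, None)
--     spanned = ''
--     for j, tok in enumerate(longer_tokens):
--         if s is None:
--             break
--         if tok == s:
--             cuts.append(j + 1)
--             s = next(it, None)
--             spanned = ''
--         else:
--             spanned += tok[2:] if tok.startswith('##') else tok
--             if len(spanned) == len(s):
--                 cuts.append(j + 1)
--                 s = next(it, None)
--                 spanned = ''
--     # stage 2: materialise each span as the range between consecutive cuts
--     token_mappings = defaultdict(list)
--     prev = 0
--     for i, c in enumerate(cuts):
--         token_mappings[i] = list(range(prev, c))
--         prev = c
--     if s is not None and prev < len(longer_tokens):
--         token_mappings[len(cuts)] = list(range(prev, len(longer_tokens)))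
--     return token_mappings
-- ===== Notes on version B (the rewrite author's own statement) =====
-- stated objective: alternative
-- what changed: A interleaves the alignment with dict mutation in one two-index while loop that appends every j to token_mappings[i] as it goes; B is two staged passes: a single for-loop over longer_tokens (consuming shorter_tokens through an iterator) records only the cut positions where a span ends, and a second pass materialises each mapping at once as the range between consecutive cuts.
import Mathlib
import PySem

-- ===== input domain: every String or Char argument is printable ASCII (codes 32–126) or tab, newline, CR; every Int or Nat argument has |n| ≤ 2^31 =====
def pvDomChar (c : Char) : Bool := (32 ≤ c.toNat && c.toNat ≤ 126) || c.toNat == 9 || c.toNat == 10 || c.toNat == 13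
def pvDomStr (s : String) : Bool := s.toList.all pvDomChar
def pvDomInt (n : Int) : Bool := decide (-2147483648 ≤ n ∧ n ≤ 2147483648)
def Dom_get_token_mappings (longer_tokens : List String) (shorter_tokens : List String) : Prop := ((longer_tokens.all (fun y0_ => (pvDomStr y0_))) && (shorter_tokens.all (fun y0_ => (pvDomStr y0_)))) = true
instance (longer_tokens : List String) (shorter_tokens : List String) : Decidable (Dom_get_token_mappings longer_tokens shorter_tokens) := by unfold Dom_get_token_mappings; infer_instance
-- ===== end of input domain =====

-- B replaces A's single dict-mutating two-index while loop by two staged passes: one scan over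
-- longer_tokens recording only the span cut positions, then a pass that materialises each mapping
-- as the range between consecutive cuts (objective: alternative decomposition, same cost).

-- ===== PORT A =====
-- shared subexpression of both Pythons: l_tkn[2:] if l_tkn.startswith('##') else l_tkn
def pvStripHash (l : String) : List Char :=
  if PySem.Str.startswith l "##" then PySem.List.slice l.toList (some 2) none else l.toList

def gtmA_loop (longer shorter : List String) (i j : Nat) (spanned : List Char)
    (d : PySem.Dict Int (List Int)) : PySem.Dict Int (List Int) :=
  if _h : i < shorter.length ∧ j < longer.length then
    let s_tkn := shorter.getD i ""
    let l_tkn := longer.getD j ""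
    if s_tkn == l_tkn then
      gtmA_loop longer shorter (i+1) (j+1) [] (d.insert (i : Int) (d.getD (i : Int) [] ++ [(j : Int)]))
    else
      let d' := d.insert (i : Int) (d.getD (i : Int) [] ++ [(j : Int)])
      let spanned' := spanned ++ pvStripHash l_tkn
      if spanned'.length == s_tkn.toList.length then
        gtmA_loop longer shorter (i+1) (j+1) [] d'
      else
        gtmA_loop longer shorter i (j+1) spanned' d'
  else d
termination_by longer.length - j
decreasing_by all_goals omega

def get_token_mappings (longer_tokens : List String) (shorter_tokens : List String) : List (Int × List Int) :=
  (gtmA_loop longer_tokens shorter_tokens 0 0 [] PySem.Dict.empty).items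

-- ===== PORT B =====
-- stage 1: scan the longer tokens once (the shorter tokens consumed iterator-style: head = current
-- target, empty = None), returning the list of cut positions and whether a target was still pending
def gtmB_cuts (ltail : List String) (j : Nat) (ss : List String) (spanned : List Char) :
    List Nat × Bool :=
  match ss with
  | [] => ([], false)
  | s :: srest =>
    match ltail with
    | [] => ([], true)
    | tok :: lrest =>
      if tok == s then
        let r := gtmB_cuts lrest (j+1) srest []
        ((j+1) :: r.1, r.2)
      else
        let spanned' := spanned ++ pvStripHash tok
        if spanned'.length == s.toList.length then
          let r := gtmB_cuts lrest (j+1) srest []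
          ((j+1) :: r.1, r.2)
        else
          gtmB_cuts lrest (j+1) (s :: srest) spanned'

-- stage 2: token_mappings[i] = list(range(prev, c)) for each cut
def gtmB_build (cuts : List Nat) (i prev : Nat) (d : PySem.Dict Int (List Int)) :
    Nat × Nat × PySem.Dict Int (List Int) :=
  match cuts with
  | [] => (i, prev, d)
  | c :: rest => gtmB_build rest (i+1) c (d.insert (i : Int) (PySem.List.pyRange (prev : Int) (c : Int)))

def get_token_mappings_alt (longer_tokens : List String) (shorter_tokens : List String) : List (Int × List Int) :=
  let r := gtmB_cuts longer_tokens 0 shorter_tokens []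
  let b := gtmB_build r.1 0 0 PySem.Dict.empty
  if r.2 && decide (b.2.1 < longer_tokens.length) then
    (b.2.2.insert (b.1 : Int) (PySem.List.pyRange (b.2.1 : Int) (longer_tokens.length : Int))).items
  else b.2.2.items

-- ===== PRECONDITION & SPEC =====
def Spec_get_token_mappings (longer_tokens : List String) (shorter_tokens : List String) (out : List (Int × List Int)) : Prop := out = get_token_mappings_alt longer_tokens shorter_tokens
instance (longer_tokens : List String) (shorter_tokens : List String) (out : List (Int × List Int)) : Decidable (Spec_get_token_mappings longer_tokens shorter_tokens out) := by unfold Spec_get_token_mappings; infer_instance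

-- ===== CLAIM (what is proved, stated in full; the proofs are below) =====
def Claim_equal_get_token_mappings : Prop := ∀ (longer_tokens : List String) (shorter_tokens : List String), Dom_get_token_mappings longer_tokens shorter_tokens → Spec_get_token_mappings longer_tokens shorter_tokens (get_token_mappings longer_tokens shorter_tokens)

-- ===== LEMMAS AND PROOFS =====

-- the pure tail A's loop appends to the dict items from state (i, j, spanned, acc)
def tailA (longer shorter : List String) (i j : Nat) (spanned : List Char) (acc : List Int) :
    List (Int × List Int) :=
  if _h : i < shorter.length ∧ j < longer.length then
    let s_tkn := shorter.getD i ""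
    let l_tkn := longer.getD j ""
    if s_tkn == l_tkn then
      ((i : Int), acc ++ [(j : Int)]) :: tailA longer shorter (i+1) (j+1) [] []
    else
      let acc' := acc ++ [(j : Int)]
      let spanned' := spanned ++ pvStripHash l_tkn
      if spanned'.length == s_tkn.toList.length then
        ((i : Int), acc') :: tailA longer shorter (i+1) (j+1) [] []
      else
        tailA longer shorter i (j+1) spanned' acc'
  else if acc.isEmpty then [] else [((i : Int), acc)]
termination_by longer.length - j
decreasing_by all_goals omega

-- the pure pairs B's stage 2 produces from the cuts, together with the final prev
def pairsB (cuts : List Nat) (i j0 : Nat) : List (Int × List Int) × Nat :=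
  match cuts with
  | [] => ([], j0)
  | c :: rest =>
    let r := pairsB rest (i+1) c
    (((i : Int), PySem.List.pyRange (j0 : Int) (c : Int)) :: r.1, r.2)

-- the trailing partial span B emits after stage 2
def trailB (len : Nat) (more : Bool) (i prev : Nat) : List (Int × List Int) :=
  if more && decide (prev < len) then
    [((i : Int), PySem.List.pyRange (prev : Int) (len : Int))]
  else []

-- the items list appended by A's loop, for the current key i (nonempty accumulator only)
def curOf (i : Nat) (acc : List Int) : List (Int × List Int) :=
  if acc = [] then [] else [((i : Int), acc)]

lemma curOf_nil (i : Nat) : curOf i [] = [] := rfl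

lemma curOf_append (i : Nat) (acc : List Int) (x : Int) :
    curOf i (acc ++ [x]) = [((i : Int), acc ++ [x])] := by
  simp [curOf]

lemma mk_get?_none (base : List (Int × List Int)) (k : Int)
    (h : ∀ p ∈ base, p.1 ≠ k) : (PySem.Dict.mk base).get? k = none := by
  have h1 : base.find? (fun p => p.1 == k) = none :=
    List.find?_eq_none.mpr (by intro p hp; simp [h p hp])
  simp [PySem.Dict.get?, h1]

lemma mk_get?_last (base : List (Int × List Int)) (k : Int) (v : List Int)
    (h : ∀ p ∈ base, p.1 ≠ k) : (PySem.Dict.mk (base ++ [(k, v)])).get? k = some v := by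
  simp only [PySem.Dict.get?]
  rw [List.find?_append]
  have h1 : base.find? (fun p => p.1 == k) = none :=
    List.find?_eq_none.mpr (by intro p hp; simp [h p hp])
  simp [h1]

lemma mk_contains_none (base : List (Int × List Int)) (k : Int)
    (h : ∀ p ∈ base, p.1 ≠ k) : (PySem.Dict.mk base).contains k = false := by
  rw [PySem.Dict.contains_eq_isSome_get?, mk_get?_none base k h]; rfl

-- one insert of A's loop body on a dict of the invariant shape
lemma insert_step (base : List (Int × List Int)) (i : Nat) (acc : List Int) (x : Int)
    (h : ∀ p ∈ base, p.1 < (i : Int)) :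
    (letI d : PySem.Dict Int (List Int) := PySem.Dict.mk (base ++ curOf i acc);
     d.insert (i : Int) (d.getD (i : Int) [] ++ [x])) = PySem.Dict.mk (base ++ [((i : Int), acc ++ [x])]) := by
  have hne : ∀ p ∈ base, p.1 ≠ (i : Int) := fun p hp => ne_of_lt (h p hp)
  by_cases hacc : acc = []
  · subst hacc
    rw [curOf_nil, List.append_nil]
    have hget : (PySem.Dict.mk base).get? (i : Int) = none := mk_get?_none base _ hne
    have hcon : (PySem.Dict.mk base).contains (i : Int) = false := mk_contains_none base _ hne
    apply PySem.Dict.ext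
    rw [PySem.Dict.items_insert_of_not_contains _ _ hcon]
    simp [PySem.Dict.getD_eq_get?_getD, hget]
  · rw [show curOf i acc = [((i : Int), acc)] by simp [curOf, hacc]]
    have hget : (PySem.Dict.mk (base ++ [((i : Int), acc)])).get? (i : Int) = some acc :=
      mk_get?_last base _ acc hne
    have hcon : (PySem.Dict.mk (base ++ [((i : Int), acc)])).contains (i : Int) = true := by
      rw [PySem.Dict.contains_eq_isSome_get?, hget]; rfl
    apply PySem.Dict.ext
    rw [PySem.Dict.items_insert_of_contains _ _ hcon]
    simp only [PySem.Dict.getD_eq_get?_getD, hget, Option.getD_some]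
    rw [List.map_append]
    congr 1
    · conv_rhs => rw [← List.map_id base]
      apply List.map_congr_left
      intro p hp
      simp [beq_iff_eq, hne p hp]
    · simp

-- A's loop extends the dict items by exactly tailA
lemma A_items (longer shorter : List String) :
    ∀ fuel j, longer.length - j ≤ fuel → ∀ (i : Nat) (spanned : List Char) (acc : List Int)
    (base : List (Int × List Int)), (∀ p ∈ base, p.1 < (i : Int)) →
    (gtmA_loop longer shorter i j spanned (PySem.Dict.mk (base ++ curOf i acc))).items
      = base ++ tailA longer shorter i j spanned acc := by
  intro fuel
  induction fuel with
  | zero =>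
    intro j hj i spanned acc base hbase
    have hjl : ¬ j < longer.length := by
      omega
    rw [gtmA_loop, tailA]
    simp only [hjl, and_false, dif_neg, not_false_iff]
    by_cases hacc : acc = [] <;> simp [hacc, curOf]
  | succ n ih =>
    intro j hj i spanned acc base hbase
    by_cases hcond : i < shorter.length ∧ j < longer.length
    · rw [gtmA_loop, tailA]
      simp only [dif_pos hcond]
      have hstep := insert_step base i acc (j : Int) hbase
      have hbase' : ∀ p ∈ base ++ [((i : Int), acc ++ [(j : Int)])], p.1 < ((i+1 : Nat) : Int) := by
        intro p hp
        rcases List.mem_append.mp hp with h | h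
        · have := hbase p h; push_cast; omega
        · simp at h; subst h; push_cast; omega
      have hih1 := ih (j+1) (by omega) (i+1) [] [] (base ++ [((i : Int), acc ++ [(j : Int)])]) hbase'
      rw [curOf_nil, List.append_nil] at hih1
      by_cases heq : shorter.getD i "" == longer.getD j ""
      · simp only [if_pos heq]
        rw [hstep, hih1, List.append_assoc, List.singleton_append]
      · simp only [if_neg heq]
        by_cases hlen : (spanned ++ pvStripHash (longer.getD j "")).length == (shorter.getD i "").toList.length
        · simp only [if_pos hlen]
          rw [hstep, hih1, List.append_assoc, List.singleton_append]
        · simp only [if_neg hlen]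
          rw [hstep]
          have hih2 := ih (j+1) (by omega) i (spanned ++ pvStripHash (longer.getD j ""))
            (acc ++ [(j : Int)]) base hbase
          rw [curOf_append] at hih2
          rw [hih2]
    · rw [gtmA_loop, tailA]
      simp only [dif_neg hcond]
      by_cases hacc : acc = [] <;> simp [hacc, curOf]

-- keys produced by pairsB lie in [i, i + cuts.length)
lemma pairsB_keys (cuts : List Nat) : ∀ i j0 p, p ∈ (pairsB cuts i j0).1 →
    (i : Int) ≤ p.1 ∧ p.1 < (i : Int) + cuts.length := by
  induction cuts with
  | nil => intro i j0 p hp; simp [pairsB] at hp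
  | cons c rest ih =>
    intro i j0 p hp
    simp only [pairsB, List.mem_cons] at hp
    rcases hp with h | h
    · subst h; exact ⟨le_refl _, by push_cast [List.length_cons]; omega⟩
    · have := ih (i+1) c p h
      push_cast [List.length_cons] at this ⊢; omega

-- B's stage 2 fold over the cuts appends exactly pairsB to the dict items
lemma B_build (cuts : List Nat) : ∀ (i prev : Nat) (base : List (Int × List Int)),
    (∀ p ∈ base, p.1 < (i : Int)) →
    gtmB_build cuts i prev (PySem.Dict.mk base)
      = (i + cuts.length, (pairsB cuts i prev).2, PySem.Dict.mk (base ++ (pairsB cuts i prev).1)) := by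
  induction cuts with
  | nil => intro i prev base hbase; simp [gtmB_build, pairsB]
  | cons c rest ih =>
    intro i prev base hbase
    have hne : ∀ p ∈ base, p.1 ≠ (i : Int) := fun p hp => ne_of_lt (hbase p hp)
    have hcon : (PySem.Dict.mk base).contains (i : Int) = false := mk_contains_none base _ hne
    have hins : (PySem.Dict.mk base).insert (i : Int) (PySem.List.pyRange (prev : Int) (c : Int))
        = PySem.Dict.mk (base ++ [((i : Int), PySem.List.pyRange (prev : Int) (c : Int))]) := by
      apply PySem.Dict.ext
      rw [PySem.Dict.items_insert_of_not_contains _ _ hcon]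
    rw [gtmB_build, hins]
    have hbase' : ∀ p ∈ base ++ [((i : Int), PySem.List.pyRange (prev : Int) (c : Int))],
        p.1 < ((i+1 : Nat) : Int) := by
      intro p hp
      rcases List.mem_append.mp hp with h | h
      · have := hbase p h; push_cast; omega
      · simp at h; subst h; push_cast; omega
    rw [ih (i+1) c _ hbase']
    simp only [pairsB, List.length_cons]
    rw [List.append_assoc, List.singleton_append,
        show i + 1 + rest.length = i + (rest.length + 1) from by omega]

-- the core correspondence: A's pure tail equals B's pairs-plus-trailing from any aligned state
lemma AB_pure (longer shorter : List String) :
    ∀ (ltail : List String) j, ltail = longer.drop j → j ≤ longer.length →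
    ∀ i (ss : List String), ss = shorter.drop i →
    ∀ (spanned : List Char) (j0 : Nat), j0 ≤ j → (j0 ≠ j → ss ≠ []) →
    tailA longer shorter i j spanned (PySem.List.pyRange (j0 : Int) (j : Int))
      = (pairsB (gtmB_cuts ltail j ss spanned).1 i j0).1
        ++ trailB longer.length (gtmB_cuts ltail j ss spanned).2
            (i + (gtmB_cuts ltail j ss spanned).1.length)
            (pairsB (gtmB_cuts ltail j ss spanned).1 i j0).2 := by
  intro ltail
  induction ltail generalizing shorter with
  | nil =>
    intro j hdrop hjle i ss hss spanned j0 hj0 hne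
    have hj : j = longer.length := by
      have := List.drop_eq_nil_iff.mp hdrop.symm; omega
    have hjl : ¬ j < longer.length := by omega
    rw [tailA]
    simp only [hjl, and_false, dif_neg, not_false_iff]
    cases ss with
    | nil =>
      have hj0j : j0 = j := by
        by_contra hc; exact (hne hc) rfl
      subst hj0j
      simp [gtmB_cuts, pairsB, trailB, PySem.List.pyRange]
    | cons s srest =>
      simp only [gtmB_cuts, pairsB, trailB, Bool.true_and]
      by_cases hlt : j0 < longer.length
      · have hlt' : (j0 : Int) < (j : Int) := by omega
        have : ¬ (PySem.List.pyRange (j0 : Int) (j : Int)).isEmpty := by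
          rw [PySem.List.pyRange_one_cons hlt']; simp
        simp only [this, if_neg, Bool.not_eq_true, decide_eq_true_eq, if_pos hlt]
        subst hj
        simp
      · have hj0j : j0 = j := by omega
        subst hj0j
        simp [PySem.List.pyRange, hlt]
  | cons tok lrest ih =>
    intro j hdrop hjle i ss hss spanned j0 hj0 hne
    have hjl : j < longer.length := by
      by_contra hc
      rw [List.drop_eq_nil_of_le (by omega)] at hdrop; simp at hdrop
    have htok : longer.getD j "" = tok := by
      have h0 : (longer.drop j)[0]? = some tok := by rw [← hdrop]; rfl
      rw [List.getElem?_drop] at h0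
      have h1 : longer[j]? = some tok := by simpa using h0
      simp [List.getD, h1]
    have hlrest : lrest = longer.drop (j+1) := by
      have := congrArg List.tail hdrop
      simpa [List.tail_drop] using this
    cases ss with
    | nil =>
      have hil : ¬ i < shorter.length := by
        intro hc
        have := List.drop_eq_nil_iff.mp hss.symm; omega
      have hj0j : j0 = j := by by_contra hc; exact (hne hc) rfl
      subst hj0j
      rw [tailA]
      simp [hil, gtmB_cuts, pairsB, trailB, PySem.List.pyRange]
    | cons s srest =>
      have hil : i < shorter.length := by
        by_contra hc
        rw [List.drop_eq_nil_of_le (by omega)] at hss; simp at hss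
      have hs : shorter.getD i "" = s := by
        have h0 : (shorter.drop i)[0]? = some s := by rw [← hss]; rfl
        rw [List.getElem?_drop] at h0
        have h1 : shorter[i]? = some s := by simpa using h0
        simp [List.getD, h1]
      have hsrest : srest = shorter.drop (i+1) := by
        have := congrArg List.tail hss
        simpa [List.tail_drop] using this
      have hrange : PySem.List.pyRange (j0 : Int) (j : Int) ++ [(j : Int)]
          = PySem.List.pyRange (j0 : Int) ((j+1 : Nat) : Int) := by
        push_cast
        rw [PySem.List.pyRange_one_succ_right (by exact_mod_cast hj0)]
      rw [tailA]
      simp only [dif_pos (show i < shorter.length ∧ j < longer.length from ⟨hil, hjl⟩), htok, hs]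
      have hrec0 : PySem.List.pyRange (((j+1 : Nat)) : Int) (((j+1 : Nat)) : Int) = [] := by
        simp [PySem.List.pyRange]
      by_cases heq : s == tok
      · have heq' : (tok == s) = true := beq_iff_eq.mpr (beq_iff_eq.mp heq).symm
        simp only [if_pos heq, gtmB_cuts, if_pos heq']
        have := ih shorter (j+1) hlrest (by omega) (i+1) srest hsrest [] (j+1) (le_refl _)
          (fun hc => absurd rfl hc)
        rw [hrec0] at this
        rw [this, hrange]
        simp only [pairsB, List.length_cons]
        rw [List.cons_append]
        congr 3
        omega
      · have heq' : ¬ (tok == s) := by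
          simp only [beq_iff_eq] at heq ⊢; exact fun h => heq h.symm
        simp only [if_neg heq, gtmB_cuts, if_neg heq']
        by_cases hlen : (spanned ++ pvStripHash tok).length == s.toList.length
        · simp only [if_pos hlen]
          have := ih shorter (j+1) hlrest (by omega) (i+1) srest hsrest [] (j+1) (le_refl _)
            (fun hc => absurd rfl hc)
          rw [hrec0] at this
          rw [this, hrange]
          simp only [pairsB, List.length_cons]
          rw [List.cons_append]
          congr 3
          omega
        · simp only [if_neg hlen]
          have := ih shorter (j+1) hlrest (by omega) i (s :: srest) hss
            (spanned ++ pvStripHash tok) j0 (by omega) (fun _ => by simp)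
          rw [← hrange] at this
          exact this

-- ===== VERDICT (by name: the statement is the Claim_ definition above) =====
theorem get_token_mappings_spec : Claim_equal_get_token_mappings := by
  intro longer shorter _
  unfold Spec_get_token_mappings get_token_mappings get_token_mappings_alt
  have hA : (gtmA_loop longer shorter 0 0 [] PySem.Dict.empty).items
      = tailA longer shorter 0 0 [] [] := by
    have := A_items longer shorter longer.length 0 (by omega) 0 [] [] [] (by simp)
    rw [curOf_nil] at this
    simpa using this
  have hpure := AB_pure longer shorter longer 0 (by simp) (by omega) 0 shorter (by simp) [] 0
    (le_refl 0) (fun hc => absurd rfl hc)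
  have hr0 : PySem.List.pyRange ((0 : Nat) : Int) ((0 : Nat) : Int) = [] := by
    simp [PySem.List.pyRange]
  rw [hr0] at hpure
  have hbuild := B_build (gtmB_cuts longer 0 shorter []).1 0 0 [] (by simp)
  have hempty : (PySem.Dict.mk ([] : List (Int × List Int))) = (PySem.Dict.empty : PySem.Dict Int (List Int)) := rfl
  rw [hempty] at hbuild
  rw [hA, hpure]
  simp only [hbuild, List.nil_append, Nat.zero_add]
  by_cases hmore : (gtmB_cuts longer 0 shorter []).2
      && decide ((pairsB (gtmB_cuts longer 0 shorter []).1 0 0).2 < longer.length)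
  · simp only [hmore, if_pos]
    have hne : ∀ p ∈ (pairsB (gtmB_cuts longer 0 shorter []).1 0 0).1,
        p.1 ≠ (((gtmB_cuts longer 0 shorter []).1.length : Nat) : Int) := by
      intro p hp
      have := pairsB_keys (gtmB_cuts longer 0 shorter []).1 0 0 p hp
      push_cast at this ⊢; omega
    have hcon := mk_contains_none _ _ hne
    rw [PySem.Dict.items_insert_of_not_contains _ _ hcon]
    simp only [trailB, hmore, if_pos]
  · simp only [hmore, if_neg, Bool.not_eq_true]
    simp only [trailB, hmore]
    simp
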